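-- pv_equiv track=rewrite | github.com/miliar/Code_Jam_Webscraper | Solutions_python/Problem_201/2859.py | check
-- ===== SOURCE A (Python) =====
-- def check(n):
--     b = 10
--     while n:
--         d = n % 10
--         if d <= b:
--             b = d
--         else:
--             return False
--         n = n // 10
--     return True
-- ===== SOURCE B (Python) =====
-- def check(n):
--     s = str(n)
--     return s == ''.join(sorted(s))
-- ===== Notes on version B (the rewrite author's own statement) =====
-- stated objective: simpler
-- what changed: Replaces the digit-by-digit modulo/divide loop with one line: the decimal string equals its sorted version iff the digits are non-decreasing; Pre_ excludes negative n, where A either loops forever or returns a value via Python floor-mod pseudo-digits while B sorts the signed decimal string - neither is specified for this digit-monotonicity check.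
-- outside the precondition, e.g. on check(-3): A returns False, B returns True; on check(-1): A does not finish within the time limit, B returns True
import Mathlib
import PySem

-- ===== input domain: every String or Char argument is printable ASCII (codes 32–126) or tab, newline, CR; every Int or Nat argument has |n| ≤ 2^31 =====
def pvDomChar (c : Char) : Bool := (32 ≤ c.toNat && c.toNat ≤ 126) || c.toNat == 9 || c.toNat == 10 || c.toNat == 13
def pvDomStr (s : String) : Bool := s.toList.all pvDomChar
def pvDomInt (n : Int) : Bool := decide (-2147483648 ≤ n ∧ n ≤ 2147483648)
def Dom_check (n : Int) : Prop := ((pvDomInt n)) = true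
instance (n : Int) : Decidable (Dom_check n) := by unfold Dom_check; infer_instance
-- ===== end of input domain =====

-- B replaces A's modulo/divide digit loop by one line — the decimal string equals its
-- sorted version iff the digits are non-decreasing (objective: simpler).

-- ===== PORT A =====
-- while-loop of A; the `else false` branch for n < 0 is only a totality guard
-- (negative n is outside Pre_check; Python A loops forever on some of those inputs).
def checkLoop (n b : Int) : Bool :=
  if n = 0 then true
  else if _h : 0 < n then
    let d := PySem.Int.mod n 10
    if d ≤ b then checkLoop (PySem.Int.floordiv n 10) d else false
  else false
termination_by n.toNat
decreasing_by
  have h10 : PySem.Int.floordiv n 10 = n / 10 := PySem.Int.floordiv_eq_ediv_of_pos (by omega)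
  rw [h10]; omega

def check (n : Int) : Bool := checkLoop n 10

-- ===== PORT B =====
-- s == ''.join(sorted(s)) is ported as char-list equality with the stable sort
-- (Python string equality = equality of the character sequences; exact).
def check_alt (n : Int) : Bool :=
  let s := PySem.Int.toChars n
  s == PySem.List.sorted s (fun c => c) false

-- ===== PRECONDITION & SPEC =====
-- Pre_check excludes negative n, where A either loops forever (e.g. n = -1, since n // 10
-- stays -1) or returns a value computed from Python's floor-mod pseudo-digits, while B sorts
-- the signed decimal string including '-' — neither behaviour is specified for this
-- digit-monotonicity check, so the corner is anybody's.
def Pre_check (n : Int) : Prop := 0 ≤ n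
instance (n : Int) : Decidable (Pre_check n) := by unfold Pre_check; infer_instance
def pvWitness_check : Int := (1223)

def Spec_check (n : Int) (out : Bool) : Prop := out = check_alt n
instance (n : Int) (out : Bool) : Decidable (Spec_check n out) := by unfold Spec_check; infer_instance

-- ===== CLAIM (what is proved, stated in full; the proofs are below) =====
def Claim_equal_check : Prop := ∀ (n : Int), Dom_check n → Pre_check n → Spec_check n (check n)

-- ===== LEMMAS AND PROOFS =====

-- Nat.toDigits computed from Nat.digits (big-endian digit characters).
lemma toDigitsCore_eq (n : Nat) : ∀ (fuel : Nat) (acc : List Char), n < fuel → 0 < n →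
    Nat.toDigitsCore 10 fuel n acc = ((Nat.digits 10 n).map Nat.digitChar).reverse ++ acc := by
  induction n using Nat.strong_induction_on with
  | _ n ih =>
    intro fuel acc hf hn
    match fuel with
    | 0 => omega
    | f + 1 =>
      rw [Nat.toDigitsCore]
      rw [Nat.digits_def' (by norm_num : 1 < 10) hn]
      by_cases h : n / 10 = 0
      · simp [h]
      · have hlt : n / 10 < n := Nat.div_lt_self hn (by norm_num)
        simp only [h, if_false]
        rw [ih (n / 10) hlt f _ (by omega) (by omega)]
        simp

lemma toChars_nonneg (n : Int) (h : 0 ≤ n) :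
    PySem.Int.toChars n =
      if n.toNat = 0 then ['0'] else ((Nat.digits 10 n.toNat).map Nat.digitChar).reverse := by
  rw [PySem.Int.toChars, if_neg (by omega)]
  by_cases h0 : n.toNat = 0
  · simp [h0, Nat.toDigits, Nat.toDigitsCore, Nat.digitChar]
  · rw [if_neg h0, Nat.toDigits, toDigitsCore_eq n.toNat _ _ (by omega) (by omega)]
    simp

-- A's loop is the chain condition on the little-endian digit list, seeded with b.
lemma checkLoop_eq (m : Nat) : ∀ (b : Int),
    checkLoop (m : Int) b =
      decide (List.IsChain (fun x y => y ≤ x) (b :: (Nat.digits 10 m).map (fun d : Nat => (d : Int)))) := by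
  induction m using Nat.strong_induction_on with
  | _ m ih =>
    intro b
    by_cases hm : m = 0
    · subst hm; rw [checkLoop]; simp
    · rw [checkLoop, if_neg (by exact_mod_cast hm),
        dif_pos (by exact_mod_cast Nat.pos_of_ne_zero hm)]
      have hmod : PySem.Int.mod (m : Int) 10 = ((m % 10 : Nat) : Int) := by
        exact_mod_cast PySem.Int.mod_natCast m 10
      have hdiv : PySem.Int.floordiv (m : Int) 10 = ((m / 10 : Nat) : Int) := by
        exact_mod_cast PySem.Int.floordiv_natCast m 10
      rw [Nat.digits_def' (by norm_num : 1 < 10) (Nat.pos_of_ne_zero hm), List.map_cons,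
        hmod, hdiv]
      by_cases hd : ((m % 10 : Nat) : Int) ≤ b
      · rw [if_pos hd, ih (m / 10) (Nat.div_lt_self (Nat.pos_of_ne_zero hm) (by norm_num))]
        simp only [decide_eq_decide, List.isChain_cons_cons]
        exact (and_iff_right hd).symm
      · rw [if_neg hd]
        symm
        rw [decide_eq_false_iff_not, List.isChain_cons_cons]
        exact fun h => hd h.1

lemma digits_lt10 (m : Nat) : ∀ d ∈ Nat.digits 10 m, d < 10 := fun _ hd =>
  Nat.digits_lt_base (by norm_num) hd

lemma check_eq_pairwise (m : Nat) :
    check (m : Int) = decide ((Nat.digits 10 m).Pairwise (fun x y => y ≤ x)) := by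
  rw [check, checkLoop_eq]
  haveI : Trans (fun x y : Int => y ≤ x) (fun x y : Int => y ≤ x) (fun x y : Int => y ≤ x) :=
    ⟨fun h1 h2 => le_trans h2 h1⟩
  simp only [decide_eq_decide]
  rw [List.isChain_iff_pairwise, List.pairwise_cons]
  simp only [List.pairwise_map, List.mem_map, Nat.cast_le]
  constructor
  · exact fun h => h.2
  · refine fun h => ⟨?_, h⟩
    rintro _ ⟨d, hd, rfl⟩
    have := digits_lt10 m d hd
    omega

-- sorted(s) == s iff s is pairwise non-decreasing
lemma sorted_id_eq_self_iff (xs : List Char) :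
    (PySem.List.sorted xs (fun c => c) false = xs) ↔ xs.Pairwise (· ≤ ·) := by
  constructor
  · intro h
    have := PySem.List.sorted_pairwise (xs := xs) (key := fun c : Char => c)
    rwa [h] at this
  · exact fun h => PySem.List.sorted_eq_self_of_pairwise xs (fun c => c) h

lemma digitChar_le_iff (a b : Nat) (ha : a < 10) (hb : b < 10) :
    Nat.digitChar a ≤ Nat.digitChar b ↔ a ≤ b := by
  interval_cases a <;> interval_cases b <;> decide

lemma alt_eq_pairwise (n : Int) (h : 0 ≤ n) :
    check_alt n = decide ((Nat.digits 10 n.toNat).Pairwise (fun x y => y ≤ x)) := by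
  rw [show check_alt n
        = (PySem.Int.toChars n == PySem.List.sorted (PySem.Int.toChars n) (fun c => c) false)
      from rfl, Bool.eq_iff_iff]
  simp only [beq_iff_eq, decide_eq_true_eq]
  rw [toChars_nonneg n h]
  by_cases h0 : n.toNat = 0
  · rw [if_pos h0]
    have hs : PySem.List.sorted ['0'] (fun c : Char => c) false = ['0'] :=
      PySem.List.sorted_eq_self_of_pairwise ['0'] (fun c => c) (by simp)
    rw [hs, h0]
    simp
  · rw [if_neg h0,
        show ∀ a : List Char, (a = PySem.List.sorted a (fun c => c) false) =
          (PySem.List.sorted a (fun c => c) false = a) from fun a => propext eq_comm,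
        sorted_id_eq_self_iff, List.pairwise_reverse, List.pairwise_map]
    constructor
    · intro hp
      refine hp.imp_of_mem ?_
      intro a b ha hb hr
      exact (digitChar_le_iff b a (digits_lt10 _ _ hb) (digits_lt10 _ _ ha)).mp hr
    · intro hp
      refine hp.imp_of_mem ?_
      intro a b ha hb hr
      exact (digitChar_le_iff b a (digits_lt10 _ _ hb) (digits_lt10 _ _ ha)).mpr hr

-- ===== VERDICT (by name: the statement is the Claim_ definition above) =====
theorem check_spec : Claim_equal_check := by
  intro n _ hpre
  unfold Spec_check
  have hn : n = ((n.toNat : Nat) : Int) := (Int.toNat_of_nonneg hpre).symm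
  rw [hn, check_eq_pairwise, alt_eq_pairwise _ (by omega), Int.toNat_natCast]
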